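-- pv_equiv track=rewrite | github.com/dtbinh/UniversityCoursework | 4th Year/Text Technologies/TTS - Coursework 3/detector.py | finnAlgorithm
-- ===== SOURCE A (Python) =====
-- def finnAlgorithm(processed):
--     L = 0
--     c = 100
--     maxValue = 0
--     abValue = ()
--     for x in range(len(processed)):
--         value = checkReturnValue(processed[x])
--         if processed[x] != '':
--             L += value
--             M = 0
--             R = 0
--             for i in range(x+1, len(processed)):
--                 innervalue = checkReturnValue(processed[i])
--                 if processed[i] != '':
--                     R -= innervalue
--                     M += 1-innervalue
--                     total = L+c*M+R
--                     if total > maxValue: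
--                         maxValue = total
--                         abValue = (x, i)
--     return abValue
--
-- def checkReturnValue(currWord):
--     xi = 1 #Is Tag by default
--     if str(currWord).isdigit(): #Is Token
--         xi = 0
--     return xi
-- ===== SOURCE B (Python) =====
-- def finnAlgorithm(processed):
--     # The cut score L + c*M + R of a pair (x, i) separates into a part that
--     # depends only on the words after x and a part that depends only on the
--     # words after i, so one backward scan maintaining suffix statistics and a
--     # running best partner finds the same lexicographically-first maximizer.
--     c = 100
--     TT = 0                 # total weight of non-empty, non-digit words
--     for s in processed:
--         if s != '' and not s.isdigit():
--             TT += 1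
--     st = 0                 # non-digit non-empty words at indices > x
--     sd = 0                 # digit words at indices > x
--     bq = None              # (max of st - c*sd over non-empty i > x, smallest such i)
--     best = 0
--     ab = ()
--     for x, s in reversed(list(enumerate(processed))):
--         if s != '' and bq is not None:
--             total = TT + c * sd - 2 * st + bq[0]
--             if total > 0 and total >= best:
--                 best = total
--                 ab = (x, bq[1])
--         if s != '':
--             q = st - c * sd
--             if bq is None or q >= bq[0]:
--                 bq = (q, x)
--         if s.isdigit():
--             sd += 1
--         elif s != '':
--             st += 1
--     return ab
-- ===== Notes on version B (the rewrite author's own statement) =====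
-- stated objective: faster
-- what changed: A scans all O(n^2) pairs (x,i) with a nested loop; B separates the pair score into an x-part and an i-part over suffix sums and finds the same lexicographically-first maximizer with one linear backward scan maintaining suffix statistics and a running best partner.
import Mathlib
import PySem

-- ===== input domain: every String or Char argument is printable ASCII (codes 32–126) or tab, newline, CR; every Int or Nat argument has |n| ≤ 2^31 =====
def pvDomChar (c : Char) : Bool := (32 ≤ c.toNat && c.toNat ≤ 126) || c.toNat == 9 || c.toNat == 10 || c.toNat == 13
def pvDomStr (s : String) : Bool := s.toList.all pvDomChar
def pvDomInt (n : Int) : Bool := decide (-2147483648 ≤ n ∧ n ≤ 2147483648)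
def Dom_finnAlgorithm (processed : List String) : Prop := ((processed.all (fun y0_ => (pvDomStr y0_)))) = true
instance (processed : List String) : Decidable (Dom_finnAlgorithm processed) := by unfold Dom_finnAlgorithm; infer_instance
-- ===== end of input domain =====

set_option maxHeartbeats 1600000

-- B replaces A's quadratic nested scan over all pairs by one linear backward
-- scan: the pair score separates into an x-part and an i-part over suffix sums.

-- ===== PORT A =====
def checkReturnValue (currWord : String) : Int :=
  if PySem.Str.strIsdigit currWord then 0 else 1

-- body of A's inner 'for i in range(x+1, len(processed))' loop
def pvAInnerBodyIdx (processed : List String) (c L x : Int)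
    (ist : Int × Int × Int × List Int) (i : Int) : Int × Int × Int × List Int :=
  let innervalue := checkReturnValue (PySem.List.pyGetD processed i "")
  if PySem.List.pyGetD processed i "" ≠ "" then
    let R := ist.2.1 - innervalue
    let M := ist.1 + (1 - innervalue)
    let total := L + c * M + R
    if total > ist.2.2.1 then (M, R, total, [x, i])
    else (M, R, ist.2.2.1, ist.2.2.2)
  else ist

-- body of A's outer 'for x in range(len(processed))' loop; state (L, maxValue, abValue)
def pvAOuterBody (processed : List String) (c : Int)
    (st : Int × Int × List Int) (x : Int) : Int × Int × List Int :=
  let value := checkReturnValue (PySem.List.pyGetD processed x "")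
  if PySem.List.pyGetD processed x "" ≠ "" then
    let L := st.1 + value
    let inner := (PySem.List.pyRange (x + 1) (PySem.List.len processed) 1).foldl
      (pvAInnerBodyIdx processed c L x) (0, 0, st.2.1, st.2.2)
    (L, inner.2.2.1, inner.2.2.2)
  else st

def finnAlgorithm (processed : List String) : List Int :=
  let c : Int := 100
  let res := (PySem.List.pyRange 0 (PySem.List.len processed) 1).foldl
    (pvAOuterBody processed c) ((0 : Int), (0 : Int), ([] : List Int))
  res.2.2

-- ===== PORT B =====
-- body of B's 'for x, s in reversed(list(enumerate(processed)))' loop;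
-- state (st, sd, bq, best, ab)
def pvBBody (c TT : Int) (acc : Int × Int × Option (Int × Int) × Int × List Int)
    (p : Int × String) : Int × Int × Option (Int × Int) × Int × List Int :=
  let stg := acc.1
  let sd := acc.2.1
  let bq := acc.2.2.1
  let best := acc.2.2.2.1
  let ab := acc.2.2.2.2
  let s := p.2
  let ba : Int × List Int :=
    if s ≠ "" then
      match bq with
      | some qj =>
        let total := TT + c * sd - 2 * stg + qj.1
        if total > 0 ∧ total ≥ best then (total, [p.1, qj.2]) else (best, ab)
      | none => (best, ab)
    else (best, ab)
  let bq' :=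
    if s ≠ "" then
      let q := stg - c * sd
      match bq with
      | some qj => if q ≥ qj.1 then some (q, p.1) else some qj
      | none => some (q, p.1)
    else bq
  let ssd : Int × Int :=
    if PySem.Str.strIsdigit s then (stg, sd + 1)
    else if s ≠ "" then (stg + 1, sd)
    else (stg, sd)
  (ssd.1, ssd.2, bq', ba.1, ba.2)

def finnAlgorithm_alt (processed : List String) : List Int :=
  let c : Int := 100
  let TT := processed.foldl
    (fun (acc : Int) s => if s ≠ "" ∧ ¬ PySem.Str.strIsdigit s then acc + 1 else acc) 0
  let final := ((PySem.List.enumerate processed 0).reverse).foldl (pvBBody c TT)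
    ((0 : Int), (0 : Int), (none : Option (Int × Int)), (0 : Int), ([] : List Int))
  final.2.2.2.2

-- ===== PRECONDITION & SPEC =====
def Spec_finnAlgorithm (processed : List String) (out : List Int) : Prop := out = finnAlgorithm_alt processed
instance (processed : List String) (out : List Int) : Decidable (Spec_finnAlgorithm processed out) := by unfold Spec_finnAlgorithm; infer_instance

-- ===== CLAIM (what is proved, stated in full; the proofs are below) =====
def Claim_equal_finnAlgorithm : Prop := ∀ (processed : List String), Dom_finnAlgorithm processed → Spec_finnAlgorithm processed (finnAlgorithm processed)

-- ===== LEMMAS AND PROOFS =====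

-- per-word weights: pvE = contribution to A's L, pvDg = digit-word indicator
def pvE (s : String) : Int := if s = "" then 0 else checkReturnValue s
def pvDg (s : String) : Int := if PySem.Str.strIsdigit s then 1 else 0

def pvST (l : List (Int × String)) : Int := (l.map (fun p => pvE p.2)).sum
def pvSD (l : List (Int × String)) : Int := (l.map (fun p => pvDg p.2)).sum

lemma pvST_cons (p : Int × String) (r : List (Int × String)) :
    pvST (p :: r) = pvE p.2 + pvST r := by simp [pvST]

lemma pvSD_cons (p : Int × String) (r : List (Int × String)) :
    pvSD (p :: r) = pvDg p.2 + pvSD r := by simp [pvSD]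

-- best i-part over a suffix (value, smallest index attaining it)
def pvBQ : List (Int × String) → Option (Int × Int)
  | [] => none
  | (i, u) :: r =>
    if u ≠ "" then
      match pvBQ r with
      | some qj =>
        if pvST r - 100 * pvSD r ≥ qj.1 then some (pvST r - 100 * pvSD r, i) else some qj
      | none => some (pvST r - 100 * pvSD r, i)
    else pvBQ r

-- best (value, pair) over all pairs inside l, A's running L being L on entry
def pvBb : Int → List (Int × String) → Int × List Int
  | _, [] => (0, [])
  | L, (x, s) :: r =>
    let br := pvBb (L + pvE s) r
    if s ≠ "" then
      match pvBQ r with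
      | some qj =>
        if L + pvE s + 100 * pvSD r - pvST r + qj.1 > 0 ∧
            L + pvE s + 100 * pvSD r - pvST r + qj.1 ≥ br.1
        then (L + pvE s + 100 * pvSD r - pvST r + qj.1, [x, qj.2])
        else br
      | none => br
    else br

-- pair-level version of A's inner body, and the structural inner loop
def pvInnerBodyP (c L x : Int) (ist : Int × Int × Int × List Int)
    (p : Int × String) : Int × Int × Int × List Int :=
  let innervalue := checkReturnValue p.2
  if p.2 ≠ "" then
    let R := ist.2.1 - innervalue
    let M := ist.1 + (1 - innervalue)
    let total := L + c * M + R
    if total > ist.2.2.1 then (M, R, total, [x, p.1])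
    else (M, R, ist.2.2.1, ist.2.2.2)
  else ist

def pvAinner (c L x : Int) (l : List (Int × String))
    (ist : Int × Int × Int × List Int) : Int × Int × Int × List Int :=
  l.foldl (pvInnerBodyP c L x) ist

-- structural version of A's outer loop
def pvArec (c : Int) : List (Int × String) → Int × Int × List Int → Int × Int × List Int
  | [], st => st
  | (x, s) :: rest, st =>
    if s ≠ "" then
      let L := st.1 + checkReturnValue s
      let inner := pvAinner c L x rest (0, 0, st.2.1, st.2.2)
      pvArec c rest (L, inner.2.2.1, inner.2.2.2)
    else pvArec c rest st

-- indexing helper: the word at position pre.length of pre ++ s :: t is s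
lemma pvGetDAt : ∀ (pre t : List String) (s : String),
    PySem.List.pyGetD (pre ++ s :: t) ((pre.length : Nat) : Int) "" = s := by
  intro pre
  induction pre with
  | nil => intro t s; simp
  | cons a pre ih =>
    intro t s
    have h1 : (((a :: pre).length : Nat) : Int) = (((pre.length + 1 : Nat)) : Int) := by simp
    rw [h1, PySem.List.pyGetD_natCast]
    have := ih t s
    rw [PySem.List.pyGetD_natCast] at this
    simpa [List.getD_cons_succ] using this

-- bridge: A's index-based inner loop over pre ++ s :: t starting at pre.length+1
-- equals the structural loop over enumerate t
lemma pvInnerBridge : ∀ (t pre : List String) (s : String) (c L x : Int)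
    (ist : Int × Int × Int × List Int),
    (PySem.List.pyRange (((pre.length : Nat) : Int) + 1)
        (PySem.List.len (pre ++ s :: t)) 1).foldl
        (pvAInnerBodyIdx (pre ++ s :: t) c L x) ist
      = pvAinner c L x (PySem.List.enumerate t (((pre.length : Nat) : Int) + 1)) ist := by
  intro t
  induction t with
  | nil =>
    intro pre s c L x ist
    rw [PySem.List.pyRange_one_eq_nil (by simp [PySem.List.len_eq] <;> omega)]
    rfl
  | cons u t ih =>
    intro pre s c L x ist
    have hlt : ((pre.length : Nat) : Int) + 1 < PySem.List.len (pre ++ s :: u :: t) := by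
      simp [PySem.List.len_eq] <;> omega
    rw [PySem.List.pyRange_one_cons hlt, List.foldl_cons, PySem.List.enumerate_cons]
    have hc : (((pre ++ [s]).length : Nat) : Int) = ((pre.length : Nat) : Int) + 1 := by simp
    have hl : (pre ++ [s]) ++ u :: t = pre ++ s :: u :: t := by simp
    have hget : PySem.List.pyGetD (pre ++ s :: u :: t) (((pre.length : Nat) : Int) + 1) "" = u := by
      have := pvGetDAt (pre ++ [s]) t u
      rw [hc, hl] at this
      exact this
    have hbody : pvAInnerBodyIdx (pre ++ s :: u :: t) c L x ist (((pre.length : Nat) : Int) + 1)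
        = pvInnerBodyP c L x ist ((((pre.length : Nat) : Int) + 1), u) := by
      simp only [pvAInnerBodyIdx, pvInnerBodyP, hget]
    rw [hbody]
    have htail := ih (pre ++ [s]) u c L x (pvInnerBodyP c L x ist ((((pre.length : Nat) : Int) + 1), u))
    rw [hc, hl] at htail
    rw [htail]
    rfl

-- bridge: A's index-based outer loop equals the structural pvArec
lemma pvOuterBridge : ∀ (suf pre : List String) (st : Int × Int × List Int),
    (PySem.List.pyRange ((pre.length : Nat) : Int) (PySem.List.len (pre ++ suf)) 1).foldl
        (pvAOuterBody (pre ++ suf) 100) st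
      = pvArec 100 (PySem.List.enumerate suf ((pre.length : Nat) : Int)) st := by
  intro suf
  induction suf with
  | nil =>
    intro pre st
    rw [PySem.List.pyRange_one_eq_nil (by simp [PySem.List.len_eq])]
    rfl
  | cons s t ih =>
    intro pre st
    have hlt : ((pre.length : Nat) : Int) < PySem.List.len (pre ++ s :: t) := by
      simp [PySem.List.len_eq] <;> omega
    rw [PySem.List.pyRange_one_cons hlt, List.foldl_cons, PySem.List.enumerate_cons]
    have hc : (((pre ++ [s]).length : Nat) : Int) = ((pre.length : Nat) : Int) + 1 := by simp
    have hl : (pre ++ [s]) ++ t = pre ++ s :: t := by simp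
    have hget : PySem.List.pyGetD (pre ++ s :: t) ((pre.length : Nat) : Int) "" = s :=
      pvGetDAt pre t s
    simp only [pvAOuterBody, hget]
    by_cases hs : s = ""
    · rw [if_neg (by simp [hs])]
      have := ih (pre ++ [s]) st
      rw [hc, hl] at this
      rw [this]
      simp [pvArec, hs]
    · rw [if_pos hs]
      rw [pvInnerBridge t pre s 100 (st.1 + checkReturnValue s) ((pre.length : Nat) : Int)]
      have := ih (pre ++ [s])
      rw [hc, hl] at this
      rw [this]
      simp [pvArec, hs]

-- collapse of A's inner loop to the best i-part of the suffix
lemma pvAinner_eq : ∀ (l : List (Int × String)) (L x M R b : Int) (ab : List Int),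
    pvAinner 100 L x l (M, R, b, ab)
      = (M + pvSD l, R - pvST l,
          match pvBQ l with
          | none => (b, ab)
          | some qj =>
            if L + 100 * M + R + 100 * pvSD l - pvST l + qj.1 > b
            then (L + 100 * M + R + 100 * pvSD l - pvST l + qj.1, [x, qj.2])
            else (b, ab)) := by
  intro l
  induction l with
  | nil =>
    intro L x M R b ab
    simp [pvAinner, pvST, pvSD, pvBQ]
  | cons p r ih =>
    obtain ⟨i, u⟩ := p
    intro L x M R b ab
    have hstep : pvAinner 100 L x ((i, u) :: r) (M, R, b, ab)
        = pvAinner 100 L x r (pvInnerBodyP 100 L x (M, R, b, ab) (i, u)) := rfl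
    rw [hstep]
    by_cases hu : u = ""
    · have h0c : PySem.Chars.strIsdigit ([] : List Char) = false := by decide
      have hP : pvInnerBodyP 100 L x (M, R, b, ab) (i, u) = (M, R, b, ab) := by
        simp [pvInnerBodyP, hu]
      rw [hP, ih]
      have h1 : pvSD ((i, u) :: r) = pvSD r := by simp [pvSD_cons, pvDg, hu, h0c]
      have h2 : pvST ((i, u) :: r) = pvST r := by simp [pvST_cons, pvE, hu]
      have h3 : pvBQ ((i, u) :: r) = pvBQ r := by simp [pvBQ, hu]
      rw [h1, h2, h3]
    · have hval : 1 - checkReturnValue u = pvDg u := by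
        by_cases hd : PySem.Chars.strIsdigit u.toList = true <;>
          simp [checkReturnValue, pvDg, hd]
      have hE : checkReturnValue u = pvE u := by simp [pvE, hu]
      have hSD : pvSD ((i, u) :: r) = pvDg u + pvSD r := pvSD_cons _ _
      have hST : pvST ((i, u) :: r) = pvE u + pvST r := pvST_cons _ _
      by_cases hc : L + 100 * (M + (1 - checkReturnValue u)) + (R - checkReturnValue u) > b
      · have hP : pvInnerBodyP 100 L x (M, R, b, ab) (i, u)
            = (M + (1 - checkReturnValue u), R - checkReturnValue u,
               L + 100 * (M + (1 - checkReturnValue u)) + (R - checkReturnValue u), [x, i]) := by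
          simp [pvInnerBodyP, hu, hc]
        rw [hP, ih]
        rcases hq : pvBQ r with _ | ⟨q, j⟩
        · have h3 : pvBQ ((i, u) :: r) = some (pvST r - 100 * pvSD r, i) := by
            simp [pvBQ, hu, hq]
          simp only [h3, hSD, hST]
          simp only [Prod.mk.injEq]
          refine ⟨by omega, by omega, ?_⟩
          split_ifs <;>
            first
            | (simp only [Prod.mk.injEq, List.cons.injEq, and_true, true_and]; omega)
            | (exfalso; omega)
            | rfl
        · have h3 : pvBQ ((i, u) :: r)
              = if pvST r - 100 * pvSD r ≥ q then some (pvST r - 100 * pvSD r, i)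
                else some (q, j) := by
            simp [pvBQ, hu, hq]
          simp only [h3, hSD, hST, hq]
          by_cases hcmp : pvST r - 100 * pvSD r ≥ q
          · simp only [if_pos hcmp]
            simp only [Prod.mk.injEq]
            refine ⟨by omega, by omega, ?_⟩
            split_ifs <;>
              first
              | (simp only [Prod.mk.injEq, List.cons.injEq, and_true, true_and]; omega)
              | (exfalso; omega)
              | rfl
          · simp only [if_neg hcmp]
            simp only [Prod.mk.injEq]
            refine ⟨by omega, by omega, ?_⟩
            split_ifs <;>
              first
              | (simp only [Prod.mk.injEq, List.cons.injEq, and_true, true_and]; omega)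
              | (exfalso; omega)
              | rfl
      · have hP : pvInnerBodyP 100 L x (M, R, b, ab) (i, u)
            = (M + (1 - checkReturnValue u), R - checkReturnValue u, b, ab) := by
          simp [pvInnerBodyP, hu, hc]
        rw [hP, ih]
        rcases hq : pvBQ r with _ | ⟨q, j⟩
        · have h3 : pvBQ ((i, u) :: r) = some (pvST r - 100 * pvSD r, i) := by
            simp [pvBQ, hu, hq]
          simp only [h3, hSD, hST]
          simp only [Prod.mk.injEq]
          refine ⟨by omega, by omega, ?_⟩
          split_ifs <;>
            first
            | (simp only [Prod.mk.injEq, List.cons.injEq, and_true, true_and]; omega)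
            | (exfalso; omega)
            | rfl
        · have h3 : pvBQ ((i, u) :: r)
              = if pvST r - 100 * pvSD r ≥ q then some (pvST r - 100 * pvSD r, i)
                else some (q, j) := by
            simp [pvBQ, hu, hq]
          simp only [h3, hSD, hST, hq]
          by_cases hcmp : pvST r - 100 * pvSD r ≥ q
          · simp only [if_pos hcmp]
            simp only [Prod.mk.injEq]
            refine ⟨by omega, by omega, ?_⟩
            split_ifs <;>
              first
              | (simp only [Prod.mk.injEq, List.cons.injEq, and_true, true_and]; omega)
              | (exfalso; omega)
              | rfl
          · simp only [if_neg hcmp]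
            simp only [Prod.mk.injEq]
            refine ⟨by omega, by omega, ?_⟩
            split_ifs <;>
              first
              | (simp only [Prod.mk.injEq, List.cons.injEq, and_true, true_and]; omega)
              | (exfalso; omega)
              | rfl

lemma pvBb_nonneg : ∀ (l : List (Int × String)) (L : Int), 0 ≤ (pvBb L l).1 := by
  intro l
  induction l with
  | nil => intro L; simp [pvBb]
  | cons p r ih =>
    obtain ⟨x, s⟩ := p
    intro L
    simp only [pvBb]
    by_cases hs : s = ""
    · rw [if_neg (by simp [hs])]; exact ih _
    · rw [if_pos hs]
      rcases hq : pvBQ r with _ | ⟨q, j⟩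
      · exact ih _
      · dsimp only
        split_ifs with h
        · simpa using le_of_lt h.1
        · exact ih _

lemma pvBb_pos_or : ∀ (l : List (Int × String)) (L : Int),
    0 < (pvBb L l).1 ∨ pvBb L l = (0, []) := by
  intro l
  induction l with
  | nil => intro L; right; rfl
  | cons p r ih =>
    obtain ⟨x, s⟩ := p
    intro L
    simp only [pvBb]
    by_cases hs : s = ""
    · rw [if_neg (by simp [hs])]; exact ih _
    · rw [if_pos hs]
      rcases hq : pvBQ r with _ | ⟨q, j⟩
      · exact ih _
      · dsimp only
        split_ifs with h
        · left; simpa using h.1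
        · exact ih _

-- collapse of A's outer loop
lemma pvArec_eq : ∀ (l : List (Int × String)) (L b : Int) (ab : List Int), 0 ≤ b →
    pvArec 100 l (L, b, ab)
      = (L + pvST l, if (pvBb L l).1 > b then pvBb L l else (b, ab)) := by
  intro l
  induction l with
  | nil =>
    intro L b ab hb
    simp only [pvArec, pvST, pvBb, List.map_nil, List.sum_nil]
    rw [if_neg (by omega)]
    simp
  | cons p r ih =>
    obtain ⟨x, s⟩ := p
    intro L b ab hb
    simp only [pvArec]
    by_cases hs : s = ""
    · rw [if_neg (by simp [hs])]
      rw [ih L b ab hb]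
      have hbb : pvBb L ((x, s) :: r) = pvBb L r := by
        simp [pvBb, hs, pvE]
      have hE0 : pvE s = 0 := by simp [pvE, hs]
      rw [hbb, pvST_cons, hE0]
      simp
    · rw [if_pos hs]
      rw [pvAinner_eq]
      have hE : pvE s = checkReturnValue s := by simp [pvE, hs]
      rcases hq : pvBQ r with _ | ⟨q, j⟩
      · simp only [hq]
        rw [ih (L + checkReturnValue s) b ab hb]
        have hbb : pvBb L ((x, s) :: r) = pvBb (L + checkReturnValue s) r := by
          simp [pvBb, hs, hq, hE]
        rw [hbb, pvST_cons, hE]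
        simp only [Prod.mk.injEq]
        exact ⟨by ring, trivial⟩
      · simp only [hq]
        have hbb : pvBb L ((x, s) :: r)
            = (if L + checkReturnValue s + 100 * pvSD r - pvST r + q > 0 ∧
                  L + checkReturnValue s + 100 * pvSD r - pvST r + q ≥ (pvBb (L + checkReturnValue s) r).1
               then (L + checkReturnValue s + 100 * pvSD r - pvST r + q, [x, j])
               else pvBb (L + checkReturnValue s) r) := by
          simp [pvBb, hs, hq, hE]
        rcases hbr : pvBb (L + checkReturnValue s) r with ⟨vr, pr⟩
        have hvr : 0 ≤ vr := by have := pvBb_nonneg r (L + checkReturnValue s); rw [hbr] at this; exact this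
        rw [hbb, hbr, pvST_cons, hE]
        by_cases hT : L + checkReturnValue s + 100 * 0 + 0 + 100 * pvSD r - pvST r + q > b
        · rw [if_pos hT]
          rw [ih (L + checkReturnValue s) _ _ (by omega)]
          rw [hbr]
          simp only [Prod.mk.injEq]
          refine ⟨by ring, ?_⟩
          split_ifs <;>
            first
            | (simp only [Prod.mk.injEq, List.cons.injEq, and_true, true_and]; omega)
            | (exfalso; omega)
            | rfl
        · rw [if_neg hT]
          rw [ih (L + checkReturnValue s) b ab hb]
          rw [hbr]
          simp only [Prod.mk.injEq]
          refine ⟨by ring, ?_⟩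
          split_ifs <;>
            first
            | (simp only [Prod.mk.injEq, List.cons.injEq, and_true, true_and]; omega)
            | (exfalso; omega)
            | rfl

-- B's backward fold computes exactly the suffix statistics and pvBb
lemma pvBfold (TT : Int) : ∀ (l : List (Int × String)),
    l.foldr (fun p acc => pvBBody 100 TT acc p)
        ((0 : Int), (0 : Int), (none : Option (Int × Int)), (0 : Int), ([] : List Int))
      = (pvST l, pvSD l, pvBQ l, pvBb (TT - pvST l) l) := by
  intro l
  induction l with
  | nil => simp [pvST, pvSD, pvBQ, pvBb]
  | cons p r ih =>
    obtain ⟨x, s⟩ := p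
    rw [List.foldr_cons, ih]
    have h0c : PySem.Chars.strIsdigit ([] : List Char) = false := by decide
    have harg : TT - pvST ((x, s) :: r) + pvE s = TT - pvST r := by
      rw [pvST_cons]; ring
    have hcons : pvBb (TT - pvST ((x, s) :: r)) ((x, s) :: r)
        = (if s ≠ "" then
             match pvBQ r with
             | some qj =>
               if (TT - pvST ((x, s) :: r)) + pvE s + 100 * pvSD r - pvST r + qj.1 > 0 ∧
                   (TT - pvST ((x, s) :: r)) + pvE s + 100 * pvSD r - pvST r + qj.1 ≥ (pvBb (TT - pvST r) r).1
               then ((TT - pvST ((x, s) :: r)) + pvE s + 100 * pvSD r - pvST r + qj.1, [x, qj.2])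
               else pvBb (TT - pvST r) r
             | none => pvBb (TT - pvST r) r
           else pvBb (TT - pvST r) r) := by
      simp only [pvBb, harg]
    have e1 : (pvBBody 100 TT (pvST r, pvSD r, pvBQ r, pvBb (TT - pvST r) r) (x, s)).1
        = pvST ((x, s) :: r) := by
      rw [pvST_cons]
      by_cases hd : PySem.Chars.strIsdigit s.toList = true
      · have hs : s ≠ "" := by intro h; subst h; simp [h0c] at hd
        simp [pvBBody, hd, pvE, checkReturnValue, hs]
      · by_cases hs : s = ""
        · simp [pvBBody, pvE, hs, h0c]
        · simp [pvBBody, hd, pvE, checkReturnValue, hs] <;> omega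
    have e2 : (pvBBody 100 TT (pvST r, pvSD r, pvBQ r, pvBb (TT - pvST r) r) (x, s)).2.1
        = pvSD ((x, s) :: r) := by
      rw [pvSD_cons]
      by_cases hd : PySem.Chars.strIsdigit s.toList = true
      · simp [pvBBody, hd, pvDg] <;> omega
      · by_cases hs : s = ""
        · simp [pvBBody, pvDg, hs, h0c]
        · simp [pvBBody, hd, pvDg, hs]
    have e3 : (pvBBody 100 TT (pvST r, pvSD r, pvBQ r, pvBb (TT - pvST r) r) (x, s)).2.2.1
        = pvBQ ((x, s) :: r) := by
      by_cases hs : s = ""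
      · simp [pvBBody, pvBQ, hs]
      · simp [pvBBody, pvBQ, hs]
    have e45 : (pvBBody 100 TT (pvST r, pvSD r, pvBQ r, pvBb (TT - pvST r) r) (x, s)).2.2.2
        = pvBb (TT - pvST ((x, s) :: r)) ((x, s) :: r) := by
      rw [hcons]
      by_cases hs : s = ""
      · rw [if_neg (by simp [hs])]
        simp [pvBBody, hs]
      · rw [if_pos hs]
        rcases hq : pvBQ r with _ | ⟨q, j⟩
        · simp [pvBBody, hs, hq]
        · have hST : pvST ((x, s) :: r) = pvE s + pvST r := pvST_cons _ _
          simp only [pvBBody, hq]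
          simp only [ne_eq, hs, not_false_eq_true, if_true, ite_true]
          split_ifs <;>
            first
            | rfl
            | (simp only [Prod.mk.injEq, List.cons.injEq, and_true, true_and]; omega)
            | (exfalso; omega)
            | omega
    calc pvBBody 100 TT (pvST r, pvSD r, pvBQ r, pvBb (TT - pvST r) r) (x, s)
        = ((pvBBody 100 TT (pvST r, pvSD r, pvBQ r, pvBb (TT - pvST r) r) (x, s)).1,
           (pvBBody 100 TT (pvST r, pvSD r, pvBQ r, pvBb (TT - pvST r) r) (x, s)).2.1,
           (pvBBody 100 TT (pvST r, pvSD r, pvBQ r, pvBb (TT - pvST r) r) (x, s)).2.2.1,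
           (pvBBody 100 TT (pvST r, pvSD r, pvBQ r, pvBb (TT - pvST r) r) (x, s)).2.2.2) := rfl
      _ = (pvST ((x, s) :: r), pvSD ((x, s) :: r), pvBQ ((x, s) :: r),
           pvBb (TT - pvST ((x, s) :: r)) ((x, s) :: r)) := by rw [e1, e2, e3, e45]

-- the TT loop of B computes the total tag weight
lemma pvTT_aux : ∀ (xs : List String) (a : Int),
    xs.foldl (fun (acc : Int) s => if s ≠ "" ∧ ¬ PySem.Str.strIsdigit s then acc + 1 else acc) a
      = a + (xs.map pvE).sum := by
  intro xs
  induction xs with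
  | nil => intro a; simp
  | cons s xs ih =>
    intro a
    rw [List.foldl_cons, ih]
    by_cases hs : s = ""
    · simp [hs, pvE]
    · by_cases hd : PySem.Chars.strIsdigit s.toList = true
      · simp [hs, hd, pvE, checkReturnValue] <;> omega
      · simp [hs, hd, pvE, checkReturnValue] <;> omega

lemma pvST_enum : ∀ (xs : List String) (k : Int),
    pvST (PySem.List.enumerate xs k) = (xs.map pvE).sum := by
  intro xs
  induction xs with
  | nil => intro k; simp [pvST]
  | cons s xs ih =>
    intro k
    rw [PySem.List.enumerate_cons, pvST_cons, ih, List.map_cons, List.sum_cons]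

-- ===== VERDICT (by name: the statement is the Claim_ definition above) =====
theorem finnAlgorithm_spec : Claim_equal_finnAlgorithm := by
  unfold Claim_equal_finnAlgorithm
  intro processed _hdom
  unfold Spec_finnAlgorithm
  -- A side
  have hA0 := pvOuterBridge processed [] ((0 : Int), (0 : Int), ([] : List Int))
  simp only [List.length_nil, Nat.cast_zero, List.nil_append] at hA0
  have hA : finnAlgorithm processed
      = (pvArec 100 (PySem.List.enumerate processed 0) ((0 : Int), (0 : Int), ([] : List Int))).2.2 := by
    show ((PySem.List.pyRange 0 (PySem.List.len processed) 1).foldl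
        (pvAOuterBody processed 100) ((0 : Int), (0 : Int), ([] : List Int))).2.2 = _
    rw [hA0]
  rw [hA, pvArec_eq (PySem.List.enumerate processed 0) 0 0 [] (le_refl 0)]
  -- B side
  have hTT : processed.foldl
      (fun (acc : Int) s => if s ≠ "" ∧ ¬ PySem.Str.strIsdigit s then acc + 1 else acc) 0
      = pvST (PySem.List.enumerate processed 0) := by
    rw [pvTT_aux, pvST_enum]; ring
  have hB : finnAlgorithm_alt processed
      = (pvBb (0 : Int) (PySem.List.enumerate processed 0)).2 := by
    show ((((PySem.List.enumerate processed 0).reverse).foldl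
        (pvBBody 100 (processed.foldl
          (fun (acc : Int) s => if s ≠ "" ∧ ¬ PySem.Str.strIsdigit s then acc + 1 else acc) 0))
        ((0 : Int), (0 : Int), (none : Option (Int × Int)), (0 : Int), ([] : List Int))).2.2.2.2 : List Int) = _
    rw [List.foldl_reverse, hTT, pvBfold]
    simp
  rw [hB]
  rcases pvBb_pos_or (PySem.List.enumerate processed 0) 0 with h | h
  · rw [if_pos h]
  · rw [h]
    simp
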